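-- pv_equiv track=rewrite | github.com/baldx/text-analysis | main.py | find_sentences
-- ===== SOURCE A (Python) =====
-- def find_sentences(longest_sentence, shortest_sentence, total_sentences, line, current_sentence):
--
--     for char in line:
--
--         if char in ".!?": #check for if char is one of the puncuation
--             sentence = current_sentence.strip()
--
--             if sentence: #checks if sentence is not an empty string
--                 total_sentences += 1
--
--                 if len(sentence) > len(longest_sentence): #if a sentence is larger than largest sentence, upddate
--                     longest_sentence = current_sentence
--
--                 if len(sentence) < len(shortest_sentence): #if a sentence is smaller than smallest sentence, upddate
--                     shortest_sentence = sentence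
--                 current_sentence = ""
--         else:
--             current_sentence += char
--
--
--     return longest_sentence, shortest_sentence, total_sentences, current_sentence
-- ===== SOURCE B (Python) =====
-- def find_sentences(longest_sentence, shortest_sentence, total_sentences, line, current_sentence):
--     # Stage 1: extract the completed (unstripped) sentences and the leftover accumulator.
--     sentences = []
--     for ch in line:
--         if ch in ".!?":
--             if current_sentence.strip():
--                 sentences.append(current_sentence)
--                 current_sentence = ""
--         else:
--             current_sentence += ch
--     # Stage 2: derive each statistic separately from the extracted list.
--     total_sentences += len(sentences)
--     shortest_sentence = min([shortest_sentence] + [s.strip() for s in sentences], key=len)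
--     for full in sentences:
--         if len(full.strip()) > len(longest_sentence):
--             longest_sentence = full
--     return longest_sentence, shortest_sentence, total_sentences, current_sentence
-- ===== Notes on version B (the rewrite author's own statement) =====
-- stated objective: alternative
-- what changed: B decomposes A's all-in-one state machine into staged passes: one pass extracts the list of completed (unstripped) sentences and the leftover accumulator, then the count is the list length, the shortest is a single min(..., key=len) over the seed plus stripped sentences, and the longest is its own small fold.
import Mathlib
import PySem

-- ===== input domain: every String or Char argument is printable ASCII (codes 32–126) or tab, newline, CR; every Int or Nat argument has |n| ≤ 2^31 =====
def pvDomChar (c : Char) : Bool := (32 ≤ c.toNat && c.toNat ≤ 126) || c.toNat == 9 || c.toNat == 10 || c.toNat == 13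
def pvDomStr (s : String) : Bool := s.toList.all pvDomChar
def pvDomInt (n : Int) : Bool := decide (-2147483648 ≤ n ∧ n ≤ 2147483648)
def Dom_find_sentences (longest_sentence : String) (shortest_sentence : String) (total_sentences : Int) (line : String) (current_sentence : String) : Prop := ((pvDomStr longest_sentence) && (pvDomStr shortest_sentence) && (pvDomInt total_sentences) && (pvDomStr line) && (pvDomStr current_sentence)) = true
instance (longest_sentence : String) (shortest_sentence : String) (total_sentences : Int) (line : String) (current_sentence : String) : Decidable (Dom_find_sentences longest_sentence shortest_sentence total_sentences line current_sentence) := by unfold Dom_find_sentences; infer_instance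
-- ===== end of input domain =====

-- B replaces A's single all-in-one state machine by staged passes: first extract the completed
-- sentences into a list, then derive count, shortest (a min with key) and longest separately.

-- ===== PORT A =====
-- A's loop body: on a punctuation char, strip the accumulated sentence and update all statistics
-- in place; otherwise append the char. State = (longest, shortest, total, current).
def pvStepA : (List Char × List Char × Int × List Char) → Char → (List Char × List Char × Int × List Char)
  | (lo, sh, tot, cur), c =>
    if c = '.' ∨ c = '!' ∨ c = '?' then
      let sentence := PySem.Chars.strip cur
      if sentence ≠ [] then
        (if sentence.length > lo.length then cur else lo,
         if sentence.length < sh.length then sentence else sh,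
         tot + 1, ([] : List Char))
      else (lo, sh, tot, cur)
    else (lo, sh, tot, cur ++ [c])

def find_sentences (longest_sentence : String) (shortest_sentence : String) (total_sentences : Int) (line : String) (current_sentence : String) : String × String × Int × String :=
  let r := line.toList.foldl pvStepA (longest_sentence.toList, shortest_sentence.toList, total_sentences, current_sentence.toList)
  (String.ofList r.1, String.ofList r.2.1, r.2.2.1, String.ofList r.2.2.2)

-- ===== PORT B =====
-- Stage 1 of B: collect the completed (unstripped) sentences; state = (sentences, current).
def pvCollect : (List (List Char) × List Char) → Char → (List (List Char) × List Char)
  | (ss, cur), c =>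
    if c = '.' ∨ c = '!' ∨ c = '?' then
      if PySem.Chars.strip cur ≠ [] then (ss ++ [cur], ([] : List Char))
      else (ss, cur)
    else (ss, cur ++ [c])

-- B's final pass for the longest sentence.
def pvLongStep (lo full : List Char) : List Char :=
  if (PySem.Chars.strip full).length > lo.length then full else lo

def find_sentences_alt (longest_sentence : String) (shortest_sentence : String) (total_sentences : Int) (line : String) (current_sentence : String) : String × String × Int × String :=
  let p := line.toList.foldl pvCollect ([], current_sentence.toList)
  let total := total_sentences + (p.1.length : Int)
  -- min([shortest_sentence] + [s.strip() for s in sentences], key=len); the list is nonempty so getD's default is never used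
  let shortest := (PySem.List.min? (shortest_sentence.toList :: p.1.map PySem.Chars.strip) (fun s => s.length)).getD shortest_sentence.toList
  let longest := p.1.foldl pvLongStep longest_sentence.toList
  (String.ofList longest, String.ofList shortest, total, String.ofList p.2)

-- ===== PRECONDITION & SPEC =====
def Spec_find_sentences (longest_sentence : String) (shortest_sentence : String) (total_sentences : Int) (line : String) (current_sentence : String) (out : String × String × Int × String) : Prop := out = find_sentences_alt longest_sentence shortest_sentence total_sentences line current_sentence
instance (longest_sentence : String) (shortest_sentence : String) (total_sentences : Int) (line : String) (current_sentence : String) (out : String × String × Int × String) : Decidable (Spec_find_sentences longest_sentence shortest_sentence total_sentences line current_sentence out) := by unfold Spec_find_sentences; infer_instance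

-- ===== CLAIM =====
def Claim_equal_find_sentences : Prop := ∀ (longest_sentence : String) (shortest_sentence : String) (total_sentences : Int) (line : String) (current_sentence : String), Dom_find_sentences longest_sentence shortest_sentence total_sentences line current_sentence → Spec_find_sentences longest_sentence shortest_sentence total_sentences line current_sentence (find_sentences longest_sentence shortest_sentence total_sentences line current_sentence)

-- ===== LEMMAS AND PROOFS =====

-- A's running-shortest step, on already-stripped sentences.
def pvShStep (sh s : List Char) : List Char := if s.length < sh.length then s else sh

-- Python's min with key=len over a nonempty list IS the running pvShStep fold.
lemma pvMinSome : ∀ (l : List (List Char)) (sh : List Char),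
    PySem.List.min? (sh :: l) (fun s => s.length) = some (l.foldl pvShStep sh) := by
  intro l
  induction l with
  | nil => intro sh; rfl
  | cons s ss ih =>
    intro sh
    have h1 : PySem.List.min? (sh :: s :: ss) (fun s => s.length)
        = PySem.List.min? (pvShStep sh s :: ss) (fun s => s.length) := by
      simp only [PySem.List.min?, List.foldl_cons, pvShStep]
      by_cases h : s.length < sh.length <;> simp [h]
    rw [h1, ih]
    rfl

lemma pvMin (sh : List Char) (l : List (List Char)) :
    (PySem.List.min? (sh :: l) (fun s => s.length)).getD sh = l.foldl pvShStep sh := by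
  rw [pvMinSome]
  rfl

-- already-collected sentences factor out of pvCollect's fold
lemma pvCollectPrefix : ∀ (cs : List Char) (ss : List (List Char)) (cur : List Char),
    cs.foldl pvCollect (ss, cur)
      = (ss ++ (cs.foldl pvCollect ([], cur)).1, (cs.foldl pvCollect ([], cur)).2) := by
  intro cs
  induction cs with
  | nil => intro ss cur; simp
  | cons c cs ih =>
    intro ss cur
    simp only [List.foldl_cons]
    by_cases hp : c = '.' ∨ c = '!' ∨ c = '?'
    · by_cases hs : PySem.Chars.strip cur ≠ []
      · have h1 : pvCollect (ss, cur) c = (ss ++ [cur], []) := by simp [pvCollect, hp, hs]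
        have h2 : pvCollect ([], cur) c = ([cur], []) := by simp [pvCollect, hp, hs]
        rw [h1, h2, ih (ss ++ [cur]) [], ih [cur] []]
        simp
      · have h1 : pvCollect (ss, cur) c = (ss, cur) := by simp [pvCollect, hp, hs]
        have h2 : pvCollect ([], cur) c = ([], cur) := by simp [pvCollect, hp, hs]
        rw [h1, h2, ih ss cur]
    · have h1 : pvCollect (ss, cur) c = (ss, cur ++ [c]) := by simp [pvCollect, hp]
      have h2 : pvCollect ([], cur) c = ([], cur ++ [c]) := by simp [pvCollect, hp]
      rw [h1, h2, ih ss (cur ++ [c])]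

-- A's single fold equals B's staged folds over the collected sentences.
lemma pvMain : ∀ (cs lo sh : List Char) (tot : Int) (cur : List Char),
    cs.foldl pvStepA (lo, sh, tot, cur)
      = ((cs.foldl pvCollect ([], cur)).1.foldl pvLongStep lo,
         ((cs.foldl pvCollect ([], cur)).1.map PySem.Chars.strip).foldl pvShStep sh,
         tot + ((cs.foldl pvCollect ([], cur)).1.length : Int),
         (cs.foldl pvCollect ([], cur)).2) := by
  intro cs
  induction cs with
  | nil => intro lo sh tot cur; simp
  | cons c cs ih =>
    intro lo sh tot cur
    simp only [List.foldl_cons]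
    by_cases hp : c = '.' ∨ c = '!' ∨ c = '?'
    · by_cases hs : PySem.Chars.strip cur ≠ []
      · have hA : pvStepA (lo, sh, tot, cur) c
            = (if (PySem.Chars.strip cur).length > lo.length then cur else lo,
               if (PySem.Chars.strip cur).length < sh.length then PySem.Chars.strip cur else sh,
               tot + 1, ([] : List Char)) := by
          simp [pvStepA, hp, hs]
        have hC : pvCollect ([], cur) c = ([cur], ([] : List Char)) := by
          simp [pvCollect, hp, hs]
        rw [hA, hC, ih, pvCollectPrefix cs [cur] []]
        simp only [List.singleton_append, List.foldl_cons, List.map_cons, List.length_cons,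
          pvLongStep, pvShStep, Prod.mk.injEq, gt_iff_lt]
        refine ⟨trivial, trivial, by push_cast; ring, trivial⟩
      · have hA : pvStepA (lo, sh, tot, cur) c = (lo, sh, tot, cur) := by
          simp [pvStepA, hp, hs]
        have hC : pvCollect ([], cur) c = ([], cur) := by simp [pvCollect, hp, hs]
        rw [hA, hC, ih]
    · have hA : pvStepA (lo, sh, tot, cur) c = (lo, sh, tot, cur ++ [c]) := by
        simp [pvStepA, hp]
      have hC : pvCollect ([], cur) c = ([], cur ++ [c]) := by simp [pvCollect, hp]
      rw [hA, hC, ih]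

-- ===== VERDICT =====
theorem find_sentences_spec : Claim_equal_find_sentences := by
  intro lo sh tot line cur _
  unfold Spec_find_sentences
  simp only [find_sentences, find_sentences_alt]
  rw [pvMain, pvMin]
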